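-- pv_equiv track=rewrite | github.com/vmartinez4169-pixel/heart_rate_analysis | main.py | clean_heartrate_data
-- ===== SOURCE A (Python) =====
-- def clean_heartrate_data(data: list) -> tuple:
--     """
--     Clean raw heart-rate data by removing malformed or impossible values.
--     """
--     cleaned_list = []
--     removed_values = 0
--
--     for row in data:
--         row = row.strip()
--
--         if row.isdigit():
--             value = int(row)
--
--             if value >= 30 and value <= 220:
--                 cleaned_list.append(value)
--             else:
--                 removed_values += 1
--         else:
--             removed_values += 1
--
--     return cleaned_list, removed_values
-- ===== SOURCE B (Python) =====
-- def clean_heartrate_data(data: list) -> tuple: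
--     # Divide and conquer: split the list in halves, clean each half recursively,
--     # then combine by concatenating kept values and adding removed counts.
--     def solve(seg):
--         if len(seg) == 0:
--             return [], 0
--         if len(seg) == 1:
--             s = seg[0].strip()
--             if s.isdigit():
--                 v = int(s)
--                 if 30 <= v <= 220:
--                     return [v], 0
--             return [], 1
--         mid = len(seg) // 2
--         l1, r1 = solve(seg[:mid])
--         l2, r2 = solve(seg[mid:])
--         return l1 + l2, r1 + r2
--     return solve(data)
-- ===== Notes on version B (the rewrite author's own statement) =====
-- stated objective: alternative
-- what changed: B replaces A's single left-to-right loop with two accumulators by a divide-and-conquer recursion: it splits the list in halves, cleans each half recursively (validating a row only at singleton leaves), and combines results by concatenation and addition of removed counts.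
import Mathlib
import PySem

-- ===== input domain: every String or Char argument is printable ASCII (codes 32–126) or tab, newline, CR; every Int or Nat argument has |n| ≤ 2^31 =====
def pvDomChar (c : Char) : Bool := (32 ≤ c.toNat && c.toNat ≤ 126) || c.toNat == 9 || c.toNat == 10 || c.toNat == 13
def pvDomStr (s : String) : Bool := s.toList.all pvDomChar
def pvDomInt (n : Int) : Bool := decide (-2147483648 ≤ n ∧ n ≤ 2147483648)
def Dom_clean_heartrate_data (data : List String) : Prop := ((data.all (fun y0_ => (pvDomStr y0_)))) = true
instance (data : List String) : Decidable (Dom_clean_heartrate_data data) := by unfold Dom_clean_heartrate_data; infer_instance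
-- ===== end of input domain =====

-- B replaces A's single loop with two accumulators by a divide-and-conquer recursion
-- (clean halves, combine by concatenation and addition) — an alternative decomposition.
-- ===== PORT A =====
def pvStepA (st : List Int × Int) (row : String) : List Int × Int :=
  let s := PySem.Str.strip row
  if PySem.Str.strIsdigit s then
    -- int(s): s is a nonempty digit string here, so ofStr? always succeeds; .getD 0 unreachable
    let value := (PySem.Int.ofStr? s).getD 0
    if value ≥ 30 ∧ value ≤ 220 then (st.1 ++ [value], st.2) else (st.1, st.2 + 1)
  else (st.1, st.2 + 1)

def clean_heartrate_data (data : List String) : List Int × Int :=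
  data.foldl pvStepA ([], 0)

-- ===== PORT B =====
-- solve(seg) from Source B: empty → ([],0); singleton → validate the one row; else split at mid
def pvSolveB (seg : List String) : List Int × Int :=
  if seg.length = 0 then ([], 0)
  else if _h1 : seg.length = 1 then
    let s := PySem.Str.strip seg.headI   -- seg[0] of the singleton
    if PySem.Str.strIsdigit s then
      let v := (PySem.Int.ofStr? s).getD 0
      if 30 ≤ v ∧ v ≤ 220 then ([v], 0) else ([], 1)
    else ([], 1)
  else
    let mid := seg.length / 2
    let lr1 := pvSolveB (seg.take mid)
    let lr2 := pvSolveB (seg.drop mid)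
    (lr1.1 ++ lr2.1, lr1.2 + lr2.2)
termination_by seg.length
decreasing_by
  · simp only [List.length_take]; omega
  · simp only [List.length_drop]; omega

def clean_heartrate_data_alt (data : List String) : List Int × Int :=
  pvSolveB data

-- ===== PRECONDITION & SPEC =====
def Spec_clean_heartrate_data (data : List String) (out : List Int × Int) : Prop := out = clean_heartrate_data_alt data
instance (data : List String) (out : List Int × Int) : Decidable (Spec_clean_heartrate_data data out) := by unfold Spec_clean_heartrate_data; infer_instance

-- ===== CLAIM =====
def Claim_equal_clean_heartrate_data : Prop := ∀ (data : List String), Dom_clean_heartrate_data data → Spec_clean_heartrate_data data (clean_heartrate_data data)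

-- ===== LEMMAS AND PROOFS =====
-- proof-side characterisation: one row's contribution
def pvParse (row : String) : Option Int :=
  let s := PySem.Str.strip row
  if PySem.Str.strIsdigit s ∧ 30 ≤ (PySem.Int.ofStr? s).getD 0 ∧ (PySem.Int.ofStr? s).getD 0 ≤ 220 then
    some ((PySem.Int.ofStr? s).getD 0)
  else none

lemma solveB_eq (l : List String) :
    pvSolveB l = (l.filterMap pvParse, (l.length : Int) - (l.filterMap pvParse).length) := by
  fun_induction pvSolveB l with
  | case1 l h0 =>
    have : l = [] := List.length_eq_zero_iff.mp h0
    subst this; simp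
  | case2 l hne h1 s hd v hb =>
    obtain ⟨x, rfl⟩ : ∃ x, l = [x] := by
      cases l with
      | nil => simp at h1
      | cons x t => cases t with
        | nil => exact ⟨x, rfl⟩
        | cons y t => simp at h1
    simp only [s, v, List.headI] at hd hb
    simp only [PySem.Str.strIsdigit, PySem.Str.strip, PySem.Int.ofStr?, String.toList_ofList] at hd hb
    simp [pvParse, PySem.Str.strIsdigit, PySem.Str.strip, PySem.Int.ofStr?, hd, hb.1, hb.2]
    simp [v, s, List.headI, PySem.Int.ofStr?, PySem.Str.strip, String.toList_ofList]
  | case3 l hne h1 s hd v hb =>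
    obtain ⟨x, rfl⟩ : ∃ x, l = [x] := by
      cases l with
      | nil => simp at h1
      | cons x t => cases t with
        | nil => exact ⟨x, rfl⟩
        | cons y t => simp at h1
    simp only [s, v, List.headI] at hd hb
    simp only [PySem.Str.strIsdigit, PySem.Str.strip, PySem.Int.ofStr?, String.toList_ofList] at hd hb
    simp [pvParse, PySem.Str.strIsdigit, PySem.Str.strip, PySem.Int.ofStr?, hd, hb]
  | case4 l hne h1 s hd =>
    obtain ⟨x, rfl⟩ : ∃ x, l = [x] := by
      cases l with
      | nil => simp at h1
      | cons x t => cases t with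
        | nil => exact ⟨x, rfl⟩
        | cons y t => simp at h1
    simp only [s, List.headI] at hd
    simp only [PySem.Str.strIsdigit, PySem.Str.strip, String.toList_ofList] at hd
    simp [pvParse, PySem.Str.strIsdigit, PySem.Str.strip, hd]
  | case5 l hne h1 mid lr1 ih1 lr2 ih2 =>
    simp only [mid, lr1, lr2, ih1, ih2]
    have hsplit : (l.take (l.length / 2)).filterMap pvParse ++ (l.drop (l.length / 2)).filterMap pvParse
        = l.filterMap pvParse := by
      rw [← List.filterMap_append, List.take_append_drop]
    refine Prod.ext ?_ ?_
    · simpa using hsplit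
    · simp only [← hsplit]
      simp [List.length_take, List.length_drop]
      omega

lemma foldA_eq (l : List String) (acc : List Int) (r : Int) :
    l.foldl pvStepA (acc, r)
      = (acc ++ l.filterMap pvParse, r + ((l.length : Int) - (l.filterMap pvParse).length)) := by
  induction l generalizing acc r with
  | nil => simp
  | cons x l ih =>
    simp only [List.foldl_cons, List.filterMap_cons]
    by_cases h1 : PySem.Chars.strIsdigit (PySem.Chars.strip x.toList)
    · by_cases h2 : 30 ≤ (PySem.Int.ofStr? (PySem.Str.strip x)).getD 0 ∧
          (PySem.Int.ofStr? (PySem.Str.strip x)).getD 0 ≤ 220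
      · have hx : pvParse x = some ((PySem.Int.ofStr? (PySem.Str.strip x)).getD 0) := by
          simp [pvParse, h1, h2]
        have hs : pvStepA (acc, r) x
            = (acc ++ [(PySem.Int.ofStr? (PySem.Str.strip x)).getD 0], r) := by
          simp [pvStepA, h1, h2.1, h2.2]
        rw [hx, hs, ih]
        refine Prod.ext ?_ ?_ <;> simp <;> try (push_cast; ring)
      · have hx : pvParse x = none := by simp [pvParse, h2]
        have hs : pvStepA (acc, r) x = (acc, r + 1) := by
          simp [pvStepA, h1, h2]
        rw [hx, hs, ih]
        refine Prod.ext ?_ ?_ <;> simp <;> try (push_cast; ring)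
    · have hx : pvParse x = none := by simp [pvParse, h1]
      have hs : pvStepA (acc, r) x = (acc, r + 1) := by simp [pvStepA, h1]
      rw [hx, hs, ih]
      refine Prod.ext ?_ ?_ <;> simp <;> try (push_cast; ring)

-- ===== VERDICT =====
theorem clean_heartrate_data_spec : Claim_equal_clean_heartrate_data := by
  intro data _
  show clean_heartrate_data data = clean_heartrate_data_alt data
  simp [clean_heartrate_data, clean_heartrate_data_alt, foldA_eq, solveB_eq]
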